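-- pv_equiv track=rewrite | github.com/smdhen/Solving-Task-Scheduling-Problem-NP-hard- | function.py | val_obj_fun
-- ===== SOURCE A (Python) =====
-- def val_obj_fun(seq):
--     val=0
--     c=0
--     seqq=[]
--     for i in range(len(seq)):
--         c+=seq[i][1]
--         seqq.append(seq[i][0])
--         if c>seq[i][2]:
--             val+=1
--     return val
-- ===== SOURCE B (Python) =====
-- def val_obj_fun(seq):
--     # Walk the schedule back-to-front: the completion time of the job at hand
--     # is the total processing time of everything not yet peeled off.
--     total = sum(job[1] for job in seq)
--     tardy = 0
--     for job in reversed(seq):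
--         if total > job[2]:
--             tardy += 1
--         total -= job[1]
--     return tardy
-- ===== Notes on version B (the rewrite author's own statement) =====
-- stated objective: alternative
-- what changed: Instead of A's forward loop accumulating prefix completion times (plus a dead seqq list), B computes the grand total of processing times once and traverses the schedule in REVERSE, maintaining the remaining total (total minus the suffix already peeled off) as each job's completion time; correct because job i's completion time equals the total minus the processing of jobs after i.
import Mathlib
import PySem

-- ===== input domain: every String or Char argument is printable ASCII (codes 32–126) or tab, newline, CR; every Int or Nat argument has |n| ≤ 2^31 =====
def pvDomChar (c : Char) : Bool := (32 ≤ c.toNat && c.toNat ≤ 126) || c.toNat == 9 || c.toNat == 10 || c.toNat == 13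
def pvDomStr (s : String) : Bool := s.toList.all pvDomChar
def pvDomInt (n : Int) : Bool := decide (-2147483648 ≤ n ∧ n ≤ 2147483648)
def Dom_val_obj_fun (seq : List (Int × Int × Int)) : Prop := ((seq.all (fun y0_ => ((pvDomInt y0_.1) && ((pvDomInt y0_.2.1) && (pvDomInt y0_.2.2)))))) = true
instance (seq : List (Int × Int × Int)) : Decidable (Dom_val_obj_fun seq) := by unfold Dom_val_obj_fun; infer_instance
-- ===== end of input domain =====

-- B replaces A's forward prefix-sum loop (with its unused seqq list) by a reverse
-- traversal: compute the grand total of processing times once, then walk the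
-- schedule back-to-front, the remaining total being each job's completion time;
-- objective: alternative (same cost, different traversal and state).

-- ===== PORT A =====
-- A's loop over range(len(seq)), carrying (val, c, seqq) exactly as A does
def pvLoopA : List (Int × Int × Int) → Int → Int → List Int → Int
  | [], val, _, _ => val
  | j :: rest, val, c, seqq =>
      let c' := c + j.2.1
      let seqq' := seqq ++ [j.1]
      pvLoopA rest (if c' > j.2.2 then val + 1 else val) c' seqq'

def val_obj_fun (seq : List (Int × Int × Int)) : Int := pvLoopA seq 0 0 []

-- ===== PORT B =====
-- total = sum(job[1] for job in seq)
def pvTotal (seq : List (Int × Int × Int)) : Int :=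
  List.foldl (fun acc j => acc + j.2.1) 0 seq

-- the 'for job in reversed(seq)' loop, carrying (total, tardy)
def pvLoopB : List (Int × Int × Int) → Int → Int → Int
  | [], _, tardy => tardy
  | j :: rest, total, tardy =>
      pvLoopB rest (total - j.2.1) (if total > j.2.2 then tardy + 1 else tardy)

def val_obj_fun_alt (seq : List (Int × Int × Int)) : Int :=
  pvLoopB seq.reverse (pvTotal seq) 0

-- ===== PRECONDITION & SPEC =====
def Spec_val_obj_fun (seq : List (Int × Int × Int)) (out : Int) : Prop := out = val_obj_fun_alt seq
instance (seq : List (Int × Int × Int)) (out : Int) : Decidable (Spec_val_obj_fun seq out) := by unfold Spec_val_obj_fun; infer_instance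

-- ===== CLAIM (what is proved, stated in full; the proofs are below) =====
def Claim_equal_val_obj_fun : Prop := ∀ (seq : List (Int × Int × Int)), Dom_val_obj_fun seq → Spec_val_obj_fun seq (val_obj_fun seq)

-- ===== LEMMAS AND PROOFS =====
-- reference count: tardy jobs of the schedule when it starts at completion time c
def pvCT (c : Int) : List (Int × Int × Int) → Int
  | [] => 0
  | j :: rest => (if c + j.2.1 > j.2.2 then 1 else 0) + pvCT (c + j.2.1) rest

theorem pvTotal_eq (seq : List (Int × Int × Int)) :
    ∀ a : Int, List.foldl (fun acc j => acc + j.2.1) a seq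
      = a + List.foldl (fun acc j => acc + j.2.1) 0 seq := by
  induction seq with
  | nil => intro a; simp
  | cons j rest ih =>
      intro a
      simp only [List.foldl_cons]
      rw [ih (a + j.2.1), ih (0 + j.2.1)]
      ring

theorem pvLoopA_eq (seq : List (Int × Int × Int)) :
    ∀ (val c : Int) (seqq : List Int),
      pvLoopA seq val c seqq = val + pvCT c seq := by
  induction seq with
  | nil => intro val c seqq; simp [pvLoopA, pvCT]
  | cons j rest ih =>
      intro val c seqq
      simp only [pvLoopA, pvCT, ih]
      split_ifs <;> ring

theorem pvLoopB_concat (ys : List (Int × Int × Int)) :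
    ∀ (j : Int × Int × Int) (total tardy : Int),
      pvLoopB (ys ++ [j]) total tardy
        = (if total - pvTotal ys > j.2.2
           then pvLoopB ys total tardy + 1 else pvLoopB ys total tardy) := by
  induction ys with
  | nil => intro j total tardy; simp [pvLoopB, pvTotal]
  | cons k rest ih =>
      intro j total tardy
      simp only [List.cons_append, pvLoopB, ih]
      have h : pvTotal (k :: rest) = k.2.1 + pvTotal rest := by
        simp only [pvTotal, List.foldl_cons]
        rw [pvTotal_eq rest (0 + k.2.1)]
        ring
      rw [h]
      have : total - (k.2.1 + pvTotal rest) = total - k.2.1 - pvTotal rest := by ring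
      rw [this]

theorem pvTotal_reverse (seq : List (Int × Int × Int)) :
    pvTotal seq.reverse = pvTotal seq := by
  induction seq with
  | nil => rfl
  | cons j rest ih =>
      simp only [List.reverse_cons, pvTotal, List.foldl_append, List.foldl_cons,
        List.foldl_nil] at *
      rw [pvTotal_eq rest (0 + j.2.1), ih]
      ring

theorem pvLoopB_eq (seq : List (Int × Int × Int)) :
    ∀ (c tardy : Int),
      pvLoopB seq.reverse (c + pvTotal seq) tardy = tardy + pvCT c seq := by
  induction seq with
  | nil => intro c tardy; simp [pvLoopB, pvTotal, pvCT]
  | cons j rest ih =>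
      intro c tardy
      have htot : pvTotal (j :: rest) = j.2.1 + pvTotal rest := by
        simp only [pvTotal, List.foldl_cons]
        rw [pvTotal_eq rest (0 + j.2.1)]
        ring
      simp only [List.reverse_cons, pvLoopB_concat, pvCT, htot, pvTotal_reverse]
      have h1 : c + (j.2.1 + pvTotal rest) - pvTotal rest = c + j.2.1 := by ring
      have h2 : c + (j.2.1 + pvTotal rest) = (c + j.2.1) + pvTotal rest := by ring
      rw [h1, h2, ih (c + j.2.1) tardy]
      split_ifs <;> ring

-- ===== VERDICT (by name: the statement is the Claim_ definition above) =====
theorem val_obj_fun_spec : Claim_equal_val_obj_fun := by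
  intro seq _
  unfold Spec_val_obj_fun val_obj_fun val_obj_fun_alt
  rw [pvLoopA_eq seq 0 0 []]
  have := (pvLoopB_eq seq 0 0).symm
  simpa using this
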